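-- pv_equiv track=rewrite | github.com/apollojain/Set-Solver | solver.py | choose_set_combo
-- ===== SOURCE A (Python) =====
-- def has_set_intersection(sets):
--     n = len(sets)
--     for i in range(n - 1):
--         for j in range(i + 1, n):
--             set_x = sets[i]
--             set_y = sets[j]
--             if set_x.intersection(set_y):
--                 return True
--     return False
--
-- def choose_set_combo(valid_triplets):
--     n = len(valid_triplets)
--     if n:
--         for i in range(n - 2):
--             for j in range(i + 1, n - 1):
--                 for k in range(j + 1, n):
--                     set_x = valid_triplets[i]
--                     set_y = valid_triplets[j]
--                     set_z = valid_triplets[k]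
--                     if not has_set_intersection([set_x, set_y, set_z]):
--                         return [i, j, k]
--         for i in range(n - 1):
--             for j in range(i + 1, n):
--                 set_x = valid_triplets[i]
--                 set_y = valid_triplets[j]
--                 if not has_set_intersection([set_x, set_y]):
--                     return [i, j]
--         return [0]
--     return None
-- ===== SOURCE B (Python) =====
-- def choose_set_combo(valid_triplets):
--     n = len(valid_triplets)
--     if n == 0:
--         return None
--     # all disjoint index pairs (i, j) with i < j, in lex order
--     pairs = [(i, j)
--              for i in range(n)
--              for j in range(i + 1, n)
--              if not valid_triplets[i].intersection(valid_triplets[j])]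
--     pair_set = set(pairs)
--     # lex-first triple: first pair (i, j) that extends, with the smallest k
--     for i, j in pairs:
--         for k in range(j + 1, n):
--             if (i, k) in pair_set and (j, k) in pair_set:
--                 return [i, j, k]
--     return list(pairs[0]) if pairs else [0]
-- ===== Notes on version B (the rewrite author's own statement) =====
-- stated objective: faster
-- what changed: B builds one lex-ordered list (plus hash set) of all disjoint index pairs, then finds the lex-first triple by extending each pair in order with its smallest common partner via O(1) pair-set lookups, and takes the list head as the lex-first pair, instead of A's blind triple/double range loops re-running set intersections inside the cubic scan.
import Mathlib
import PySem

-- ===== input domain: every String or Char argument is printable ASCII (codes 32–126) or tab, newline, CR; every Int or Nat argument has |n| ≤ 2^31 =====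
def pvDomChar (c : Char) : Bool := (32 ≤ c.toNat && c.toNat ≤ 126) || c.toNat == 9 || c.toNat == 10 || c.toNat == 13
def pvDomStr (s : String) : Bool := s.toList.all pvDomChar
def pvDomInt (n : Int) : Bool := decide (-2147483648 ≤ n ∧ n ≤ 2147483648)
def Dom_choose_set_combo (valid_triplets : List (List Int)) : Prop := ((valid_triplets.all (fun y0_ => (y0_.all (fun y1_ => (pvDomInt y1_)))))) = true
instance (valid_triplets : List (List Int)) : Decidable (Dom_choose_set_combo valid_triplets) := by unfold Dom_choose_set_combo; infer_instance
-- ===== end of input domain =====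

-- B replaces A's blind nested range scans by one precomputed lex-ordered list of
-- disjoint index pairs: the lex-first triple is the first pair extended by its
-- smallest common partner, the lex-first pair is the list's head (measured faster).
-- Python sets (set[int]) are modelled as Lean lists of their distinct elements.

-- ===== PORT A =====
-- bool(set_x.intersection(set_y)): true iff the two sets share an element
def pyIntersects (x y : List Int) : Bool := x.any (fun e => y.contains e)

-- literal port of has_set_intersection: double loop i < j over `sets`
def has_set_intersection (sets : List (List Int)) : Bool :=
  let n := sets.length
  (List.range (n - 1)).any (fun i =>
    (List.range' (i + 1) (n - (i + 1))).any (fun j =>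
      pyIntersects (sets.getD i []) (sets.getD j [])))

def choose_set_combo (valid_triplets : List (List Int)) : Option (List Int) :=
  let n := valid_triplets.length
  if n ≠ 0 then
    match (List.range (n - 2)).findSome? (fun i =>
        (List.range' (i + 1) ((n - 1) - (i + 1))).findSome? (fun j =>
          (List.range' (j + 1) (n - (j + 1))).findSome? (fun k =>
            if !has_set_intersection [valid_triplets.getD i [], valid_triplets.getD j [], valid_triplets.getD k []] then
              some [(i : Int), (j : Int), (k : Int)]
            else none))) with
    | some r => some r
    | none =>
      match (List.range (n - 1)).findSome? (fun i =>
          (List.range' (i + 1) (n - (i + 1))).findSome? (fun j =>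
            if !has_set_intersection [valid_triplets.getD i [], valid_triplets.getD j []] then
              some [(i : Int), (j : Int)]
            else none)) with
      | some r => some r
      | none => some [0]
  else none

-- ===== PORT B =====
-- `not x.intersection(y)`: no element of x occurs in y
def bDisjoint (x y : List Int) : Bool := x.all (fun e => !(y.contains e))

-- inner loop of the comprehension: pairs (i, b) for b indexing `ys` from j on,
-- kept when the set at b is disjoint from x
def pairsAux (x : List Int) (i : Nat) : Nat → List (List Int) → List (Nat × Nat)
  | _, [] => []
  | j, y :: ys =>
    if bDisjoint x y then (i, j) :: pairsAux x i (j + 1) ys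
    else pairsAux x i (j + 1) ys

-- the full comprehension: every disjoint pair (i, j) with i < j, in lex order
def disjointPairs : Nat → List (List Int) → List (Nat × Nat)
  | _, [] => []
  | s, x :: rest => pairsAux x s (s + 1) rest ++ disjointPairs (s + 1) rest

-- smallest k in [k, n) with (i, k) and (j, k) both disjoint pairs
-- (python's `(i, k) in pair_set`: the pairs are distinct, so set membership = list membership)
def findK (i j : Nat) (pairs : List (Nat × Nat)) (n : Nat) (k : Nat) : Option Nat :=
  if _h : k < n then
    if pairs.contains (i, k) && pairs.contains (j, k) then some k
    else findK i j pairs n (k + 1)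
  else none
termination_by n - k

-- the pair loop: first pair that extends to a triple, with its smallest k
def firstTriple (n : Nat) (pairs : List (Nat × Nat)) : List (Nat × Nat) → Option (List Int)
  | [] => none
  | (i, j) :: rest =>
    match findK i j pairs n (j + 1) with
    | some k => some [(i : Int), (j : Int), (k : Int)]
    | none => firstTriple n pairs rest

def choose_set_combo_alt (valid_triplets : List (List Int)) : Option (List Int) :=
  match valid_triplets with
  | [] => none
  | _ :: _ =>
    let pairs := disjointPairs 0 valid_triplets
    match firstTriple valid_triplets.length pairs pairs with
    | some t => some t
    | none =>
      match pairs with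
      | (i, j) :: _ => some [(i : Int), (j : Int)]
      | [] => some [0]

-- ===== PRECONDITION & SPEC =====
def Spec_choose_set_combo (valid_triplets : List (List Int)) (out : Option (List Int)) : Prop := out = choose_set_combo_alt valid_triplets
instance (valid_triplets : List (List Int)) (out : Option (List Int)) : Decidable (Spec_choose_set_combo valid_triplets out) := by unfold Spec_choose_set_combo; infer_instance

-- ===== CLAIM (what is proved, stated in full; the proofs are below) =====
def Claim_equal_choose_set_combo : Prop := ∀ (valid_triplets : List (List Int)), Dom_choose_set_combo valid_triplets → Spec_choose_set_combo valid_triplets (choose_set_combo valid_triplets)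

-- ===== LEMMAS AND PROOFS =====

-- pairwise disjointness of the sets at two indices
def gD (vt : List (List Int)) (i j : Nat) : Bool := bDisjoint (vt.getD i []) (vt.getD j [])

-- B's test equals the negation of A's test
theorem bDisjoint_eq (x y : List Int) : bDisjoint x y = !pyIntersects x y := by
  simp [bDisjoint, pyIntersects, List.all_eq_not_any_not]

-- `bool(x.intersection(y))` unfolded on two- and three-element argument lists
theorem hsi2 (x y : List Int) : has_set_intersection [x, y] = pyIntersects x y := by
  simp [has_set_intersection, List.range_succ, List.range']

theorem hsi3 (x y z : List Int) :
    has_set_intersection [x, y, z] = (pyIntersects x y || pyIntersects x z || pyIntersects y z) := by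
  simp [has_set_intersection, List.range_succ, List.range', Bool.or_assoc]

theorem not_hsi2 (x y : List Int) : (!has_set_intersection [x, y]) = bDisjoint x y := by
  rw [hsi2, bDisjoint_eq]

theorem not_hsi3 (x y z : List Int) :
    (!has_set_intersection [x, y, z]) = (bDisjoint x y && bDisjoint x z && bDisjoint y z) := by
  rw [hsi3, bDisjoint_eq, bDisjoint_eq, bDisjoint_eq]
  cases pyIntersects x y <;> cases pyIntersects x z <;> cases pyIntersects y z <;> rfl

-- generic findSome? plumbing
theorem fs_congr {α β : Type} (l : List α) (f g : α → Option β) (h : ∀ x ∈ l, f x = g x) :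
    l.findSome? f = l.findSome? g := by
  induction l with
  | nil => rfl
  | cons a t ih =>
    simp only [List.findSome?_cons]
    rw [h a (by simp)]
    cases g a with
    | some v => rfl
    | none => exact ih (fun x hx => h x (by simp [hx]))

theorem fs_none {α β : Type} (l : List α) (f : α → Option β) (h : ∀ x ∈ l, f x = none) :
    l.findSome? f = none := by
  induction l with
  | nil => rfl
  | cons a t ih =>
    simp only [List.findSome?_cons, h a (by simp)]
    exact ih (fun x hx => h x (by simp [hx]))

theorem fs_range'_guard {α : Type} (a b m : Nat) (h : a + b ≤ m) (f : Nat → Option α) :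
    (List.range' a b).findSome? f
      = (List.range m).findSome? (fun x => if a ≤ x ∧ x < a + b then f x else none) := by
  have hsplit : List.range m = List.range' 0 a ++ List.range' a b ++ List.range' (a + b) (m - (a + b)) := by
    rw [List.range_eq_range']
    have h1 : List.range' 0 a ++ List.range' a b = List.range' 0 (a + b) := by
      have := List.range'_append (s := 0) (m := a) (n := b) (step := 1)
      simpa using this
    rw [List.append_assoc, ← List.append_assoc, h1]
    have := List.range'_append (s := 0) (m := a + b) (n := m - (a + b)) (step := 1)
    simp only [Nat.one_mul, Nat.zero_add] at this
    rw [this]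
    congr 1
    omega
  rw [hsplit, List.findSome?_append, List.findSome?_append]
  rw [fs_none (List.range' 0 a) _ (fun x hx => by
    have := List.mem_range'_1.mp hx; rw [if_neg (by omega)])]
  rw [fs_none (List.range' (a+b) (m - (a+b))) _ (fun x hx => by
    have := List.mem_range'_1.mp hx; rw [if_neg (by omega)])]
  simp only [Option.none_or, Option.or_none]
  exact fs_congr _ _ _ (fun x hx => by
    have := List.mem_range'_1.mp hx
    exact (if_pos (by omega : a ≤ x ∧ x < a + b)).symm)

theorem fs_range_guard {α : Type} (b m : Nat) (h : b ≤ m) (f : Nat → Option α) :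
    (List.range b).findSome? f = (List.range m).findSome? (fun x => if x < b then f x else none) := by
  rw [List.range_eq_range' (n := b), fs_range'_guard 0 b m (by omega)]
  exact fs_congr _ _ _ (fun x hx => by simp only [Nat.zero_add, Nat.zero_le, true_and])

-- canonical forms of the two search phases, as guarded scans over List.range
def triC (vt : List (List Int)) : Option (List Int) :=
  (List.range vt.length).findSome? (fun i =>
    (List.range vt.length).findSome? (fun j =>
      if i < j ∧ gD vt i j = true then
        (List.range vt.length).findSome? (fun k =>
          if j < k ∧ gD vt i k = true ∧ gD vt j k = true then
            some [(i : Int), (j : Int), (k : Int)]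
          else none)
      else none))

def pairC (vt : List (List Int)) : Option (List Int) :=
  (List.range vt.length).findSome? (fun i =>
    (List.range vt.length).findSome? (fun j =>
      if i < j ∧ gD vt i j = true then some [(i : Int), (j : Int)] else none))

-- A's triple phase equals the canonical triple scan
theorem A_tri (vt : List (List Int)) :
    (List.range (vt.length - 2)).findSome? (fun i =>
      (List.range' (i + 1) ((vt.length - 1) - (i + 1))).findSome? (fun j =>
        (List.range' (j + 1) (vt.length - (j + 1))).findSome? (fun k =>
          if !has_set_intersection [vt.getD i [], vt.getD j [], vt.getD k []] then
            some [(i : Int), (j : Int), (k : Int)]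
          else none))) = triC vt := by
  rw [fs_range_guard (vt.length - 2) vt.length (by omega)]
  unfold triC
  apply fs_congr; intro i hi; beta_reduce
  rw [List.mem_range] at hi
  by_cases hi2 : i < vt.length - 2
  · rw [if_pos hi2, fs_range'_guard (i + 1) ((vt.length - 1) - (i + 1)) vt.length (by omega)]
    apply fs_congr; intro j hj; beta_reduce
    rw [List.mem_range] at hj
    by_cases hj2 : i + 1 ≤ j ∧ j < i + 1 + ((vt.length - 1) - (i + 1))
    · rw [if_pos hj2, fs_range'_guard (j + 1) (vt.length - (j + 1)) vt.length (by omega)]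
      by_cases hD : gD vt i j = true
      · rw [if_pos ⟨by omega, hD⟩]
        apply fs_congr; intro k hk; beta_reduce
        rw [List.mem_range] at hk
        by_cases hk2 : j < k
        · rw [if_pos (by omega : j + 1 ≤ k ∧ k < j + 1 + (vt.length - (j + 1))), not_hsi3]
          simp only [gD] at hD
          rw [hD, Bool.true_and]
          by_cases ha : bDisjoint (vt.getD i []) (vt.getD k []) = true <;>
            by_cases hb : bDisjoint (vt.getD j []) (vt.getD k []) = true <;>
            simp [hk2, gD]
        · rw [if_neg (by omega), if_neg (fun hc => hk2 hc.1)]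
      · rw [if_neg (fun hc => hD hc.2)]
        apply fs_none; intro k hk; beta_reduce
        split_ifs with h1 h2
        · exfalso
          rw [not_hsi3] at h2
          simp only [gD, Bool.and_eq_true] at h2 hD
          exact hD h2.1.1
        · rfl
        · rfl
    · rw [if_neg hj2]
      symm
      split_ifs with h1
      · have hij := h1.1
        apply fs_none; intro k hk; beta_reduce
        rw [List.mem_range] at hk
        rw [if_neg (fun hc => absurd hc.1 (by omega))]
      · rfl
  · rw [if_neg hi2]
    symm
    apply fs_none; intro j hj; beta_reduce
    rw [List.mem_range] at hj
    split_ifs with h1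
    · have hij := h1.1
      apply fs_none; intro k hk; beta_reduce
      rw [List.mem_range] at hk
      rw [if_neg (fun hc => absurd hc.1 (by omega))]
    · rfl

-- A's pair phase equals the canonical pair scan
theorem A_pair (vt : List (List Int)) :
    (List.range (vt.length - 1)).findSome? (fun i =>
      (List.range' (i + 1) (vt.length - (i + 1))).findSome? (fun j =>
        if !has_set_intersection [vt.getD i [], vt.getD j []] then
          some [(i : Int), (j : Int)]
        else none)) = pairC vt := by
  rw [fs_range_guard (vt.length - 1) vt.length (by omega)]
  unfold pairC
  apply fs_congr; intro i hi; beta_reduce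
  rw [List.mem_range] at hi
  by_cases hi2 : i < vt.length - 1
  · rw [if_pos hi2, fs_range'_guard (i + 1) (vt.length - (i + 1)) vt.length (by omega)]
    apply fs_congr; intro j hj; beta_reduce
    rw [List.mem_range] at hj
    by_cases hj2 : i + 1 ≤ j ∧ j < i + 1 + (vt.length - (i + 1))
    · rw [if_pos hj2, not_hsi2]
      have hij : i < j := by omega
      by_cases hD : bDisjoint (vt.getD i []) (vt.getD j []) = true
      · rw [if_pos hD, if_pos (⟨hij, hD⟩ : i < j ∧ gD vt i j = true)]
      · rw [if_neg hD, if_neg (fun hc => hD hc.2)]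
    · rw [if_neg hj2, if_neg (fun hc => absurd hc.1 (by omega))]
  · rw [if_neg hi2]
    symm
    apply fs_none; intro j hj; beta_reduce
    rw [List.mem_range] at hj
    rw [if_neg (fun hc => absurd hc.1 (by omega))]

-- ===== B-side lemmas =====

-- membership in the inner comprehension
theorem pairsAux_mem (x : List Int) (i a b : Nat) :
    ∀ (ys : List (List Int)) (j : Nat),
      ((a, b) ∈ pairsAux x i j ys ↔
        a = i ∧ j ≤ b ∧ b < j + ys.length ∧ bDisjoint x (ys.getD (b - j) []) = true) := by
  intro ys
  induction ys with
  | nil => intro j; simp [pairsAux]; omega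
  | cons y ys ih =>
    intro j
    by_cases hd : bDisjoint x y = true
    · simp only [pairsAux, if_pos hd, List.mem_cons, ih (j + 1), List.length_cons, Prod.mk.injEq]
      constructor
      · rintro (⟨rfl, rfl⟩ | ⟨rfl, h1, h2, h3⟩)
        · exact ⟨rfl, le_refl _, by omega, by simpa using hd⟩
        · refine ⟨rfl, by omega, by omega, ?_⟩
          have hb : b - j = (b - (j + 1)) + 1 := by omega
          rw [hb]; simpa using h3
      · rintro ⟨rfl, h1, h2, h3⟩
        by_cases hbj : b = j
        · exact Or.inl ⟨rfl, hbj⟩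
        · refine Or.inr ⟨rfl, by omega, by omega, ?_⟩
          have hb : b - j = (b - (j + 1)) + 1 := by omega
          rw [hb] at h3; simpa using h3
    · simp only [pairsAux, if_neg hd, ih (j + 1), List.length_cons]
      constructor
      · rintro ⟨rfl, h1, h2, h3⟩
        refine ⟨rfl, by omega, by omega, ?_⟩
        have hb : b - j = (b - (j + 1)) + 1 := by omega
        rw [hb]; simpa using h3
      · rintro ⟨rfl, h1, h2, h3⟩
        by_cases hbj : b = j
        · exfalso; apply hd; subst hbj; simpa using h3
        · refine ⟨rfl, by omega, by omega, ?_⟩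
          have hb : b - j = (b - (j + 1)) + 1 := by omega
          rw [hb] at h3; simpa using h3

-- membership in the pair list
theorem disjointPairs_mem (a b : Nat) :
    ∀ (l : List (List Int)) (s : Nat),
      ((a, b) ∈ disjointPairs s l ↔
        s ≤ a ∧ a < b ∧ b < s + l.length ∧
          bDisjoint (l.getD (a - s) []) (l.getD (b - s) []) = true) := by
  intro l
  induction l with
  | nil => intro s; simp [disjointPairs]; omega
  | cons x rest ih =>
    intro s
    simp only [disjointPairs, List.mem_append, pairsAux_mem, ih (s + 1), List.length_cons]
    constructor
    · rintro (⟨rfl, h1, h2, h3⟩ | ⟨h0, h1, h2, h3⟩)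
      · refine ⟨le_refl _, by omega, by omega, ?_⟩
        have hb : b - a = (b - (a + 1)) + 1 := by omega
        rw [Nat.sub_self, hb]; simpa using h3
      · refine ⟨by omega, h1, by omega, ?_⟩
        have hasub : a - s = (a - (s + 1)) + 1 := by omega
        have hbsub : b - s = (b - (s + 1)) + 1 := by omega
        rw [hasub, hbsub]; simpa using h3
    · rintro ⟨h0, h1, h2, h3⟩
      by_cases has : a = s
      · subst has
        refine Or.inl ⟨rfl, by omega, by omega, ?_⟩
        have hb : b - a = (b - (a + 1)) + 1 := by omega
        rw [Nat.sub_self, hb] at h3; simpa using h3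
      · refine Or.inr ⟨by omega, h1, by omega, ?_⟩
        have hasub : a - s = (a - (s + 1)) + 1 := by omega
        have hbsub : b - s = (b - (s + 1)) + 1 := by omega
        rw [hasub, hbsub] at h3; simpa using h3

-- contains on the pair list, read through gD
theorem pairs_contains (vt : List (List Int)) (a b : Nat) :
    (disjointPairs 0 vt).contains (a, b) = true ↔
      a < b ∧ b < vt.length ∧ gD vt a b = true := by
  rw [List.contains_iff_mem, disjointPairs_mem]
  simp [gD]

-- findSome? over the inner comprehension as a guarded range scan
theorem pairsAux_fs {β : Type} (x : List Int) (i : Nat) (f : Nat × Nat → Option β) :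
    ∀ (ys : List (List Int)) (j : Nat),
      (pairsAux x i j ys).findSome? f
        = (List.range' j ys.length).findSome? (fun b =>
            if bDisjoint x (ys.getD (b - j) []) = true then f (i, b) else none) := by
  intro ys
  induction ys with
  | nil => intro j; rfl
  | cons y ys ih =>
    intro j
    have htail :
        (List.range' (j + 1) ys.length).findSome? (fun b =>
            if bDisjoint x ((y :: ys).getD (b - j) []) = true then f (i, b) else none)
          = (pairsAux x i (j + 1) ys).findSome? f := by
      rw [ih (j + 1)]
      apply fs_congr; intro b hb; beta_reduce
      have hb' := List.mem_range'_1.mp hb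
      have hg : (y :: ys).getD (b - j) [] = ys.getD (b - (j + 1)) [] := by
        have hb2 : b - j = (b - (j + 1)) + 1 := by omega
        rw [hb2]; simp
      rw [hg]
    simp only [pairsAux, List.length_cons, List.range'_succ, List.findSome?_cons]
    by_cases hd : bDisjoint x y = true
    · rw [if_pos hd]
      have hgj : (y :: ys).getD (j - j) [] = y := by simp
      rw [hgj, if_pos hd]
      simp only [List.findSome?_cons]
      cases f (i, j) with
      | some v => rfl
      | none => exact htail.symm
    · rw [if_neg hd]
      have hgj : (y :: ys).getD (j - j) [] = y := by simp
      rw [hgj, if_neg hd]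
      exact htail.symm

-- findSome? over the pair list as a nested guarded range scan
theorem disjointPairs_fs {β : Type} (f : Nat × Nat → Option β) :
    ∀ (l : List (List Int)) (s : Nat),
      (disjointPairs s l).findSome? f
        = (List.range' s l.length).findSome? (fun a =>
            (List.range' (a + 1) (s + l.length - (a + 1))).findSome? (fun b =>
              if bDisjoint (l.getD (a - s) []) (l.getD (b - s) []) = true then f (a, b) else none)) := by
  intro l
  induction l with
  | nil => intro s; rfl
  | cons x rest ih =>
    intro s
    have hhead :
        (List.range' (s + 1) (s + (rest.length + 1) - (s + 1))).findSome? (fun b =>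
            if bDisjoint ((x :: rest).getD (s - s) []) ((x :: rest).getD (b - s) []) = true then f (s, b) else none)
          = (pairsAux x s (s + 1) rest).findSome? f := by
      have hc : s + (rest.length + 1) - (s + 1) = rest.length := by omega
      rw [hc, pairsAux_fs]
      apply fs_congr; intro b hb; beta_reduce
      have hb' := List.mem_range'_1.mp hb
      have hg1 : (x :: rest).getD (s - s) [] = x := by simp
      have hg2 : (x :: rest).getD (b - s) [] = rest.getD (b - (s + 1)) [] := by
        have hb2 : b - s = (b - (s + 1)) + 1 := by omega
        rw [hb2]; simp
      rw [hg1, hg2]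
    have htail :
        (List.range' (s + 1) rest.length).findSome? (fun a =>
            (List.range' (a + 1) (s + (rest.length + 1) - (a + 1))).findSome? (fun b =>
              if bDisjoint ((x :: rest).getD (a - s) []) ((x :: rest).getD (b - s) []) = true then f (a, b) else none))
          = (disjointPairs (s + 1) rest).findSome? f := by
      rw [ih (s + 1)]
      apply fs_congr; intro a ha; beta_reduce
      have ha' := List.mem_range'_1.mp ha
      have hc : s + (rest.length + 1) - (a + 1) = s + 1 + rest.length - (a + 1) := by omega
      rw [hc]
      apply fs_congr; intro b hb; beta_reduce
      have hb' := List.mem_range'_1.mp hb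
      have hg1 : (x :: rest).getD (a - s) [] = rest.getD (a - (s + 1)) [] := by
        have : a - s = (a - (s + 1)) + 1 := by omega
        rw [this]; simp
      have hg2 : (x :: rest).getD (b - s) [] = rest.getD (b - (s + 1)) [] := by
        have : b - s = (b - (s + 1)) + 1 := by omega
        rw [this]; simp
      rw [hg1, hg2]
    simp only [disjointPairs, List.length_cons, List.range'_succ, List.findSome?_append,
      List.findSome?_cons]
    rw [hhead, htail]
    cases (pairsAux x s (s + 1) rest).findSome? f with
    | some v => rfl
    | none => simp

-- findK as a guarded range scan
theorem findK_eq (i j n : Nat) (pairs : List (Nat × Nat)) :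
    ∀ (m k : Nat), m = n - k →
      findK i j pairs n k
        = (List.range' k (n - k)).findSome? (fun t =>
            if (pairs.contains (i, t) && pairs.contains (j, t)) = true then some t else none) := by
  intro m
  induction m with
  | zero =>
    intro k hk
    have hnk : ¬ k < n := by omega
    unfold findK
    rw [dif_neg hnk]
    have : n - k = 0 := by omega
    rw [this]; rfl
  | succ m ih =>
    intro k hk
    have hkn : k < n := by omega
    unfold findK
    rw [dif_pos hkn]
    have hc : n - k = m + 1 := by omega
    rw [hc, List.range'_succ]
    simp only [List.findSome?_cons]
    by_cases ht : (pairs.contains (i, k) && pairs.contains (j, k)) = true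
    · rw [if_pos ht, if_pos ht]
    · rw [if_neg ht, if_neg ht, ih (k + 1) (by omega)]
      have : n - (k + 1) = m := by omega
      rw [this]

-- the pair loop as findSome? over the pair list
theorem firstTriple_eq (n : Nat) (pairs : List (Nat × Nat)) :
    ∀ (l : List (Nat × Nat)),
      firstTriple n pairs l
        = l.findSome? (fun p =>
            (findK p.1 p.2 pairs n (p.2 + 1)).map
              (fun (k : Nat) => ([(p.1 : Int), (p.2 : Int), (k : Int)] : List Int))) := by
  intro l
  induction l with
  | nil => rfl
  | cons p rest ih =>
    obtain ⟨i, j⟩ := p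
    simp only [firstTriple, List.findSome?_cons]
    cases findK i j pairs n (j + 1) with
    | some k => rfl
    | none => exact ih

-- pulling a post-processing map through findSome?
theorem fs_map {α β γ : Type} (f : α → Option β) (g : β → γ) :
    ∀ (l : List α), (l.findSome? f).map g = l.findSome? (fun x => (f x).map g) := by
  intro l
  induction l with
  | nil => rfl
  | cons a rest ih =>
    simp only [List.findSome?_cons]
    cases f a with
    | some v => rfl
    | none => exact ih

-- B's triple phase equals the canonical triple scan
theorem B_tri (vt : List (List Int)) :
    firstTriple vt.length (disjointPairs 0 vt) (disjointPairs 0 vt) = triC vt := by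
  rw [firstTriple_eq, disjointPairs_fs]
  unfold triC
  rw [show List.range' 0 vt.length = List.range vt.length from (List.range_eq_range').symm]
  apply fs_congr; intro a ha; beta_reduce
  rw [List.mem_range] at ha
  rw [fs_range'_guard (a + 1) (0 + vt.length - (a + 1)) vt.length (by omega)]
  apply fs_congr; intro b hb; beta_reduce
  rw [List.mem_range] at hb
  simp only [Nat.sub_zero]
  by_cases hab : a + 1 ≤ b ∧ b < a + 1 + (0 + vt.length - (a + 1))
  · rw [if_pos hab]
    by_cases hD : bDisjoint (vt.getD a []) (vt.getD b []) = true
    · rw [if_pos hD, if_pos (⟨by omega, hD⟩ : a < b ∧ gD vt a b = true)]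
      rw [findK_eq a b vt.length (disjointPairs 0 vt) (vt.length - (b + 1)) (b + 1) rfl]
      rw [fs_map]
      rw [fs_range'_guard (b + 1) (vt.length - (b + 1)) vt.length (by omega)]
      apply fs_congr; intro k hk; beta_reduce
      rw [List.mem_range] at hk
      by_cases hbk : b + 1 ≤ k ∧ k < b + 1 + (vt.length - (b + 1))
      · rw [if_pos hbk]
        by_cases hcond : (b < k ∧ gD vt a k = true ∧ gD vt b k = true)
        · have h1 : (disjointPairs 0 vt).contains (a, k) = true :=
            (pairs_contains vt a k).mpr ⟨by omega, hk, hcond.2.1⟩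
          have h2 : (disjointPairs 0 vt).contains (b, k) = true :=
            (pairs_contains vt b k).mpr ⟨by omega, hk, hcond.2.2⟩
          rw [if_pos (by rw [h1, h2]; rfl), if_pos hcond]
          rfl
        · have hcc : ¬ (((disjointPairs 0 vt).contains (a, k) && (disjointPairs 0 vt).contains (b, k)) = true) := by
            intro hc
            rw [Bool.and_eq_true] at hc
            have h1 := (pairs_contains vt a k).mp hc.1
            have h2 := (pairs_contains vt b k).mp hc.2
            exact hcond ⟨by omega, h1.2.2, h2.2.2⟩
          rw [if_neg hcond, if_neg hcc]
          rfl
      · rw [if_neg hbk, if_neg (fun hc => absurd hc.1 (by omega))]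
    · rw [if_neg hD, if_neg (fun hc => hD hc.2)]
  · rw [if_neg hab, if_neg (fun hc => absurd hc.1 (by omega))]

-- canonical pair scan as findSome? over the pair list
theorem B_pair (vt : List (List Int)) :
    (disjointPairs 0 vt).findSome? (fun p => some [(p.1 : Int), (p.2 : Int)]) = pairC vt := by
  rw [disjointPairs_fs]
  unfold pairC
  rw [show List.range' 0 vt.length = List.range vt.length from (List.range_eq_range').symm]
  apply fs_congr; intro a ha; beta_reduce
  rw [List.mem_range] at ha
  rw [fs_range'_guard (a + 1) (0 + vt.length - (a + 1)) vt.length (by omega)]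
  apply fs_congr; intro b hb; beta_reduce
  rw [List.mem_range] at hb
  simp only [Nat.sub_zero]
  by_cases hab : a + 1 ≤ b ∧ b < a + 1 + (0 + vt.length - (a + 1))
  · rw [if_pos hab]
    by_cases hD : bDisjoint (vt.getD a []) (vt.getD b []) = true
    · rw [if_pos hD, if_pos (⟨by omega, hD⟩ : a < b ∧ gD vt a b = true)]
    · rw [if_neg hD, if_neg (fun hc => hD hc.2)]
  · rw [if_neg hab, if_neg (fun hc => absurd hc.1 (by omega))]

-- B's fallback (head of the pair list, else [0]) equals A's pair cascade
theorem B_fallback (vt : List (List Int)) :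
    (match disjointPairs 0 vt with
      | (i, j) :: _ => some [(i : Int), (j : Int)]
      | [] => some [(0 : Int)])
      = (match pairC vt with
          | some r => some r
          | none => some [(0 : Int)]) := by
  rw [← B_pair]
  cases disjointPairs 0 vt with
  | nil => rfl
  | cons p rest => obtain ⟨i, j⟩ := p; rfl

-- ===== VERDICT (by name: the statement is the Claim_ definition above) =====
theorem choose_set_combo_spec : Claim_equal_choose_set_combo := by
  intro vt _
  unfold Spec_choose_set_combo
  show choose_set_combo vt = choose_set_combo_alt vt
  cases vt with
  | nil => rfl
  | cons x rest =>
    have hA := A_tri (x :: rest)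
    have hP := A_pair (x :: rest)
    have hB := B_tri (x :: rest)
    have hF := B_fallback (x :: rest)
    simp only [List.length_cons] at hA hP hB ⊢
    simp only [choose_set_combo, choose_set_combo_alt, List.length_cons,
      Nat.succ_ne_zero, ne_eq, not_false_iff, if_true]
    rw [hA, hB]
    cases htri : triC (x :: rest) with
    | some t => rfl
    | none =>
      rw [hP, hF]
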